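-- pv_equiv track=rewrite | github.com/dprgarner/codejam | python/2018/Q_robot.py | get_damage
-- ===== SOURCE A (Python) =====
-- def get_damage(attacks):
--     damage = 0
--     power = 1
--     for c in attacks:
--         if c == 'C':
--             power *= 2
--         else:
--             damage += power
--     return damage
-- ===== SOURCE B (Python) =====
-- def get_damage(attacks):
--     damage = 0
--     for c in reversed(attacks):
--         if c == 'C':
--             damage *= 2
--         else:
--             damage += 1
--     return damage
-- ===== Notes on version B (the rewrite author's own statement) =====
-- stated objective: simpler
-- what changed: B scans the string in reverse with a single accumulator, doubling the accumulated damage at each 'C' instead of tracking a separate power variable.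
import Mathlib
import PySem

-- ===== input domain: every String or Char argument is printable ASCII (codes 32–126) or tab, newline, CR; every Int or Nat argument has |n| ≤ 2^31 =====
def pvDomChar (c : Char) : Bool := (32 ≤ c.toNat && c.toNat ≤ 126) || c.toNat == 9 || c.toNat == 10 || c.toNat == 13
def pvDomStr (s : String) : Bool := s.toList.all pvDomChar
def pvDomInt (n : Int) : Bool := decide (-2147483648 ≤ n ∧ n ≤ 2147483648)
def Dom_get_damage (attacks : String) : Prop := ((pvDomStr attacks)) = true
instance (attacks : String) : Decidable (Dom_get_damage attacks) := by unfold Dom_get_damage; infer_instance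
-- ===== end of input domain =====

-- B replaces A's (damage, power) pair with a single reverse-scan accumulator: same O(n), simpler state.

-- ===== PORT A =====
def get_damage (attacks : String) : Int :=
  (attacks.toList.foldl
    (fun (st : Int × Int) c =>
      if c = 'C' then (st.1, st.2 * 2) else (st.1 + st.2, st.2))
    (0, 1)).1

-- ===== PORT B =====
def get_damage_alt (attacks : String) : Int :=
  attacks.toList.reverse.foldl
    (fun (damage : Int) c => if c = 'C' then damage * 2 else damage + 1) 0

-- ===== PRECONDITION & SPEC =====
def Spec_get_damage (attacks : String) (out : Int) : Prop := out = get_damage_alt attacks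
instance (attacks : String) (out : Int) : Decidable (Spec_get_damage attacks out) := by unfold Spec_get_damage; infer_instance

-- ===== CLAIM (what is proved, stated in full; the proofs are below) =====
def Claim_equal_get_damage : Prop := ∀ (attacks : String), Dom_get_damage attacks → Spec_get_damage attacks (get_damage attacks)

-- ===== LEMMAS AND PROOFS =====

-- B's reverse foldl is the foldr of the same step over the original list.
theorem get_damage_alt_eq_foldr (attacks : String) :
    get_damage_alt attacks
      = attacks.toList.foldr (fun c d => if c = 'C' then d * 2 else d + 1) 0 := by
  unfold get_damage_alt
  rw [List.foldl_reverse]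

-- A's loop invariant: final damage = initial damage + power * (foldr value of the rest).
theorem get_damage_invariant (l : List Char) (d p : Int) :
    (l.foldl
      (fun (st : Int × Int) c =>
        if c = 'C' then (st.1, st.2 * 2) else (st.1 + st.2, st.2))
      (d, p)).1
      = d + p * l.foldr (fun c d => if c = 'C' then d * 2 else d + 1) 0 := by
  induction l generalizing d p with
  | nil => simp
  | cons c l ih =>
    by_cases h : c = 'C' <;> simp [h, ih] <;> ring

-- ===== VERDICT (by name: the statement is the Claim_ definition above) =====
theorem get_damage_spec : Claim_equal_get_damage := by
  intro attacks _
  unfold Spec_get_damage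
  rw [get_damage_alt_eq_foldr]
  unfold get_damage
  rw [get_damage_invariant]
  ring
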